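-- pv_equiv track=rewrite | github.com/dad/base | src/translate.py | getCodonsForAA
-- ===== SOURCE A (Python) =====
-- _genetic_code = {
-- 		'TTT':'F', 'TTC':'F', 'TTA':'L', 'TTG':'L', 'CTT':'L', 'CTC':'L',
-- 		'CTA':'L', 'CTG':'L', 'ATT':'I', 'ATC':'I', 'ATA':'I', 'ATG':'M', 'GTT':'V',
-- 		'GTC':'V', 'GTA':'V', 'GTG':'V', 'TCT':'S', 'TCC':'S', 'TCA':'S',
-- 		'TCG':'S', 'CCT':'P', 'CCC':'P', 'CCA':'P', 'CCG':'P', 'ACT':'T',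
-- 		'ACC':'T', 'ACA':'T', 'ACG':'T', 'GCT':'A', 'GCC':'A', 'GCA':'A',
-- 		'GCG':'A', 'TAT':'Y', 'TAC':'Y', 'TAA':'*', 'TAG':'*',
-- 		'CAT':'H', 'CAC':'H', 'CAA':'Q', 'CAG':'Q', 'AAT':'N', 'AAC':'N',
-- 		'AAA':'K', 'AAG':'K', 'GAT':'D', 'GAC':'D', 'GAA':'E', 'GAG':'E',
-- 		'TGT':'C', 'TGC':'C', 'TGA':'*', 'TGG':'W', 'CGT':'R',
-- 		'CGC':'R', 'CGA':'R', 'CGG':'R', 'AGT':'S', 'AGC':'S', 'AGA':'R',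
-- 		'AGG':'R', 'GGT':'G', 'GGC':'G', 'GGA':'G', 'GGG':'G',
-- 		'UUU':'F', 'UUC':'F', 'UUA':'L', 'UUG':'L', 'CUU':'L', 'CUC':'L',
-- 		'CUA':'L', 'CUG':'L', 'AUU':'I', 'AUC':'I', 'AUA':'I', 'AUG':'M', 'GUU':'V',
-- 		'GUC':'V', 'GUA':'V', 'GUG':'V', 'UCU':'S', 'UCC':'S', 'UCA':'S',
-- 		'UCG':'S', 'CCU':'P', 'CCC':'P', 'CCA':'P', 'CCG':'P', 'ACU':'T',
-- 		'ACC':'T', 'ACA':'T', 'ACG':'T', 'GCU':'A', 'GCC':'A', 'GCA':'A',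
-- 		'GCG':'A', 'UAU':'Y', 'UAC':'Y', 'UAA':'*', 'UAG':'*',
-- 		'CAU':'H', 'CAC':'H', 'CAA':'Q', 'CAG':'Q', 'AAU':'N', 'AAC':'N',
-- 		'AAA':'K', 'AAG':'K', 'GAU':'D', 'GAC':'D', 'GAA':'E', 'GAG':'E',
-- 		'UGU':'C', 'UGC':'C', 'UGA':'*', 'UGG':'W', 'CGU':'R',
-- 		'CGC':'R', 'CGA':'R', 'CGG':'R', 'AGU':'S', 'AGC':'S', 'AGA':'R',
-- 		'AGG':'R', 'GGU':'G', 'GGC':'G', 'GGA':'G', 'GGG':'G'}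
--
-- def getCodonsForAA(aa, rna=True):
-- 	gc = _genetic_code
-- 	aa_codons = []
-- 	if rna:
-- 		aa_codons = [c for c in gc.keys() if gc[c] == aa and not 'T' in c]
-- 	else:
-- 		aa_codons = [c for c in gc.keys() if gc[c] == aa and not 'U' in c]
-- 	return aa_codons
-- ===== SOURCE B (Python) =====
-- # B: the reverse mapping amino acid -> codons is a hard-coded constant table
-- # (precomputed once, entries in the same order A's scan of _genetic_code yields);
-- # each call is a direct lookup plus the T/U filter instead of a 128-entry scan.
-- _aa_to_codons = {
--     'F': ['TTT', 'TTC', 'UUU', 'UUC'],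
--     'L': ['TTA', 'TTG', 'CTT', 'CTC', 'CTA', 'CTG',
--           'UUA', 'UUG', 'CUU', 'CUC', 'CUA', 'CUG'],
--     'I': ['ATT', 'ATC', 'ATA', 'AUU', 'AUC', 'AUA'],
--     'M': ['ATG', 'AUG'],
--     'V': ['GTT', 'GTC', 'GTA', 'GTG', 'GUU', 'GUC', 'GUA', 'GUG'],
--     'S': ['TCT', 'TCC', 'TCA', 'TCG', 'AGT', 'AGC',
--           'UCU', 'UCC', 'UCA', 'UCG', 'AGU'],
--     'P': ['CCT', 'CCC', 'CCA', 'CCG', 'CCU'],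
--     'T': ['ACT', 'ACC', 'ACA', 'ACG', 'ACU'],
--     'A': ['GCT', 'GCC', 'GCA', 'GCG', 'GCU'],
--     'Y': ['TAT', 'TAC', 'UAU', 'UAC'],
--     '*': ['TAA', 'TAG', 'TGA', 'UAA', 'UAG', 'UGA'],
--     'H': ['CAT', 'CAC', 'CAU'],
--     'Q': ['CAA', 'CAG'],
--     'N': ['AAT', 'AAC', 'AAU'],
--     'K': ['AAA', 'AAG'],
--     'D': ['GAT', 'GAC', 'GAU'],
--     'E': ['GAA', 'GAG'],
--     'C': ['TGT', 'TGC', 'UGU', 'UGC'],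
--     'W': ['TGG', 'UGG'],
--     'R': ['CGT', 'CGC', 'CGA', 'CGG', 'AGA', 'AGG', 'CGU'],
--     'G': ['GGT', 'GGC', 'GGA', 'GGG', 'GGU'],
-- }
--
-- def getCodonsForAA(aa, rna=True):
--     candidates = _aa_to_codons.get(aa, [])
--     bad = 'T' if rna else 'U'
--     return [c for c in candidates if bad not in c]
-- ===== Notes on version B (the rewrite author's own statement) =====
-- stated objective: faster
-- what changed: B replaces A's per-call scan of the whole 128-entry codon->amino dict with a hard-coded reverse table amino->codons (built once, in A's scan order) answered by a single dict lookup plus the T/U filter.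
import Mathlib
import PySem

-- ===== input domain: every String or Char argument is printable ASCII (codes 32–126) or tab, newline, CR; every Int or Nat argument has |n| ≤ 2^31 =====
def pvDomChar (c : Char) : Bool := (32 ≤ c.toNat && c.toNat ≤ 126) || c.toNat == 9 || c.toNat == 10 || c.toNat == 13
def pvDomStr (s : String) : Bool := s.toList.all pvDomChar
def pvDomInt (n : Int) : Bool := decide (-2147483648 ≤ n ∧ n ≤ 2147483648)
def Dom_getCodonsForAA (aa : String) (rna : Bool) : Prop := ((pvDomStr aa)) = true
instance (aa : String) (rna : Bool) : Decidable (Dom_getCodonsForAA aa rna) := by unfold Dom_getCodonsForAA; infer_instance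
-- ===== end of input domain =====

-- B answers each call by a direct lookup in a hard-coded reverse table amino acid → codons
-- (entries in the order A's scan yields) plus the T/U filter, instead of A's scan of the
-- whole 128-entry genetic-code dict per call.

-- ===== PORT A =====
-- the module-level dict literal _genetic_code (duplicate keys overwrite in place, as in Python)
def gcPairs : List (String × String) := [
  ("TTT", "F"), ("TTC", "F"), ("TTA", "L"), ("TTG", "L"), ("CTT", "L"), ("CTC", "L"),
  ("CTA", "L"), ("CTG", "L"), ("ATT", "I"), ("ATC", "I"), ("ATA", "I"), ("ATG", "M"),
  ("GTT", "V"), ("GTC", "V"), ("GTA", "V"), ("GTG", "V"), ("TCT", "S"), ("TCC", "S"),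
  ("TCA", "S"), ("TCG", "S"), ("CCT", "P"), ("CCC", "P"), ("CCA", "P"), ("CCG", "P"),
  ("ACT", "T"), ("ACC", "T"), ("ACA", "T"), ("ACG", "T"), ("GCT", "A"), ("GCC", "A"),
  ("GCA", "A"), ("GCG", "A"), ("TAT", "Y"), ("TAC", "Y"), ("TAA", "*"), ("TAG", "*"),
  ("CAT", "H"), ("CAC", "H"), ("CAA", "Q"), ("CAG", "Q"), ("AAT", "N"), ("AAC", "N"),
  ("AAA", "K"), ("AAG", "K"), ("GAT", "D"), ("GAC", "D"), ("GAA", "E"), ("GAG", "E"),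
  ("TGT", "C"), ("TGC", "C"), ("TGA", "*"), ("TGG", "W"), ("CGT", "R"), ("CGC", "R"),
  ("CGA", "R"), ("CGG", "R"), ("AGT", "S"), ("AGC", "S"), ("AGA", "R"), ("AGG", "R"),
  ("GGT", "G"), ("GGC", "G"), ("GGA", "G"), ("GGG", "G"), ("UUU", "F"), ("UUC", "F"),
  ("UUA", "L"), ("UUG", "L"), ("CUU", "L"), ("CUC", "L"), ("CUA", "L"), ("CUG", "L"),
  ("AUU", "I"), ("AUC", "I"), ("AUA", "I"), ("AUG", "M"), ("GUU", "V"), ("GUC", "V"),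
  ("GUA", "V"), ("GUG", "V"), ("UCU", "S"), ("UCC", "S"), ("UCA", "S"), ("UCG", "S"),
  ("CCU", "P"), ("CCC", "P"), ("CCA", "P"), ("CCG", "P"), ("ACU", "T"), ("ACC", "T"),
  ("ACA", "T"), ("ACG", "T"), ("GCU", "A"), ("GCC", "A"), ("GCA", "A"), ("GCG", "A"),
  ("UAU", "Y"), ("UAC", "Y"), ("UAA", "*"), ("UAG", "*"), ("CAU", "H"), ("CAC", "H"),
  ("CAA", "Q"), ("CAG", "Q"), ("AAU", "N"), ("AAC", "N"), ("AAA", "K"), ("AAG", "K"),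
  ("GAU", "D"), ("GAC", "D"), ("GAA", "E"), ("GAG", "E"), ("UGU", "C"), ("UGC", "C"),
  ("UGA", "*"), ("UGG", "W"), ("CGU", "R"), ("CGC", "R"), ("CGA", "R"), ("CGG", "R"),
  ("AGU", "S"), ("AGC", "S"), ("AGA", "R"), ("AGG", "R"), ("GGU", "G"), ("GGC", "G"),
  ("GGA", "G"), ("GGG", "G")]

def gcDict : PySem.Dict String String := PySem.Dict.ofList gcPairs

def getCodonsForAA (aa : String) (rna : Bool) : List String :=
  if rna then
    gcDict.keys.filter (fun c => (gcDict.getD c "" == aa) && !(PySem.Str.isIn "T" c))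
  else
    gcDict.keys.filter (fun c => (gcDict.getD c "" == aa) && !(PySem.Str.isIn "U" c))

-- ===== PORT B =====
-- the hard-coded reverse table _aa_to_codons of Source B
def aaTable : PySem.Dict String (List String) := PySem.Dict.ofList [
  ("F", ["TTT", "TTC", "UUU", "UUC"]),
  ("L", ["TTA", "TTG", "CTT", "CTC", "CTA", "CTG",
         "UUA", "UUG", "CUU", "CUC", "CUA", "CUG"]),
  ("I", ["ATT", "ATC", "ATA", "AUU", "AUC", "AUA"]),
  ("M", ["ATG", "AUG"]),
  ("V", ["GTT", "GTC", "GTA", "GTG", "GUU", "GUC", "GUA", "GUG"]),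
  ("S", ["TCT", "TCC", "TCA", "TCG", "AGT", "AGC",
         "UCU", "UCC", "UCA", "UCG", "AGU"]),
  ("P", ["CCT", "CCC", "CCA", "CCG", "CCU"]),
  ("T", ["ACT", "ACC", "ACA", "ACG", "ACU"]),
  ("A", ["GCT", "GCC", "GCA", "GCG", "GCU"]),
  ("Y", ["TAT", "TAC", "UAU", "UAC"]),
  ("*", ["TAA", "TAG", "TGA", "UAA", "UAG", "UGA"]),
  ("H", ["CAT", "CAC", "CAU"]),
  ("Q", ["CAA", "CAG"]),
  ("N", ["AAT", "AAC", "AAU"]),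
  ("K", ["AAA", "AAG"]),
  ("D", ["GAT", "GAC", "GAU"]),
  ("E", ["GAA", "GAG"]),
  ("C", ["TGT", "TGC", "UGU", "UGC"]),
  ("W", ["TGG", "UGG"]),
  ("R", ["CGT", "CGC", "CGA", "CGG", "AGA", "AGG", "CGU"]),
  ("G", ["GGT", "GGC", "GGA", "GGG", "GGU"])]

def getCodonsForAA_alt (aa : String) (rna : Bool) : List String :=
  let candidates := aaTable.getD aa []
  let bad := if rna then "T" else "U"
  candidates.filter (fun c => !(PySem.Str.isIn bad c))

-- ===== PRECONDITION & SPEC =====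
def Spec_getCodonsForAA (aa : String) (rna : Bool) (out : List String) : Prop := out = getCodonsForAA_alt aa rna
instance (aa : String) (rna : Bool) (out : List String) : Decidable (Spec_getCodonsForAA aa rna out) := by unfold Spec_getCodonsForAA; infer_instance

-- ===== CLAIM (what is proved, stated in full; the proofs are below) =====
def Claim_equal_getCodonsForAA : Prop := ∀ (aa : String) (rna : Bool), Dom_getCodonsForAA aa rna → Spec_getCodonsForAA aa rna (getCodonsForAA aa rna)

-- ===== LEMMAS AND PROOFS =====

-- every value stored in the genetic-code dict is a key of B's reverse table
set_option maxRecDepth 10000 in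
theorem gc_values_in_table :
    gcDict.keys.all (fun c => aaTable.contains (gcDict.getD c "")) = true := by decide

-- on every amino acid that IS a key of the reverse table, the two ports agree (finite check)
set_option maxRecDepth 10000 in
theorem agree_on_table_keys :
    aaTable.keys.all (fun a =>
      (getCodonsForAA a true == getCodonsForAA_alt a true) &&
      (getCodonsForAA a false == getCodonsForAA_alt a false)) = true := by decide

-- ===== VERDICT (by name: the statement is the Claim_ definition above) =====
theorem getCodonsForAA_spec : Claim_equal_getCodonsForAA := by
  intro aa rna _
  unfold Spec_getCodonsForAA
  by_cases h : aaTable.contains aa = true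
  · -- aa is in the reverse table: covered by the finite check
    have hmem : aa ∈ aaTable.keys := (PySem.Dict.contains_iff_mem_keys aaTable aa).mp h
    have hagree := List.all_eq_true.mp agree_on_table_keys aa hmem
    rcases (Bool.and_eq_true _ _).mp hagree with ⟨ht, hf⟩
    cases rna
    · exact eq_of_beq hf
    · exact eq_of_beq ht
  · -- aa is not a value of the genetic code: both sides are empty
    have hc : aaTable.contains aa = false := by simpa using h
    have hB : getCodonsForAA_alt aa rna = [] := by
      unfold getCodonsForAA_alt
      simp [PySem.Dict.getD_of_not_contains aaTable [] hc]
    rw [hB]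
    unfold getCodonsForAA
    have hpred : ∀ c ∈ gcDict.keys, (gcDict.getD c "" == aa) = false := by
      intro c hcm
      have hv := List.all_eq_true.mp gc_values_in_table c hcm
      by_contra hne
      have : gcDict.getD c "" = aa := by
        cases hbe : (gcDict.getD c "" == aa)
        · exact absurd hbe hne
        · exact eq_of_beq hbe
      rw [this] at hv
      rw [hv] at hc
      exact Bool.true_eq_false.mp hc
    cases rna <;>
      · simp only [if_true, if_false, Bool.false_eq_true]
        apply List.filter_eq_nil_iff.mpr
        intro c hcm
        simp [hpred c hcm]
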